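-- pv_equiv track=rewrite | github.com/wenhuchen/ML-Interview | Leetcode/microsoft/problem8.py | maxPalindromeLength
-- ===== SOURCE A (Python) =====
-- from collections import Counter
--
-- def maxPalindromeLength(s1, s2):
--     count1 = Counter(s1)
--     count2 = Counter(s2)
--     total_count = count1 + count2
--     length = 0
--     odd_found = False
--
--     for count in total_count.values():
--         if count % 2 == 0:
--             length += count
--         else:
--             length += count - 1
--             odd_found = True
--
--     if odd_found:
--         length += 1
--
--     return length
-- ===== SOURCE B (Python) =====
-- def maxPalindromeLength(s1, s2):
--     # Single pass parity-toggling: keep only the set of characters seen an odd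
--     # number of times so far; no counts are ever built or summed.
--     odd = set()
--     for ch in s1:
--         if ch in odd:
--             odd.discard(ch)
--         else:
--             odd.add(ch)
--     for ch in s2:
--         if ch in odd:
--             odd.discard(ch)
--         else:
--             odd.add(ch)
--     k = len(odd)
--     return len(s1) + len(s2) - k + (1 if k else 0)
-- ===== Notes on version B (the rewrite author's own statement) =====
-- stated objective: alternative
-- what changed: B never builds or sums character counts: it maintains a parity set, toggling each character's membership as the two strings are scanned once, and derives the answer from the total length minus the parity set's size (plus one centre if nonempty), whereas A builds two Counters, adds them and accumulates adjusted counts per character.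
import Mathlib
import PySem

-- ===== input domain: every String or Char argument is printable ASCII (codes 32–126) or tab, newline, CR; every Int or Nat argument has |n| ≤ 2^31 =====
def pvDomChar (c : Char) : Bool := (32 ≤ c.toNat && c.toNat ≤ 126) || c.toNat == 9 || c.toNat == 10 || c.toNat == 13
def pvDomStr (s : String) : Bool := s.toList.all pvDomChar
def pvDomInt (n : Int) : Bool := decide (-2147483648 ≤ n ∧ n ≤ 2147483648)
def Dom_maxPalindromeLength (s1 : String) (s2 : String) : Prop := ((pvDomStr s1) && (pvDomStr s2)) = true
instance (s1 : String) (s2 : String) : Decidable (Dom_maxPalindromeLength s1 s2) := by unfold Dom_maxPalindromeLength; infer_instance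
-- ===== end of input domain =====

-- B replaces A's Counter construction/addition and count-summing loop by a single parity-toggling
-- pass: a set of characters seen an odd number of times, and the answer from total length minus its size.

-- ===== PORT A =====
-- Counter.__add__ (CPython): a new counter with self's keys first (count + other[k], kept if > 0),
-- then other's keys not in self (kept if count > 0); exact transliteration of 'count1 + count2'.
def pvCounterAdd (a b : PySem.Dict Char Int) : PySem.Dict Char Int :=
  let r := a.items.foldl
    (fun r p => if p.2 + b.getD p.1 0 > 0 then r.insert p.1 (p.2 + b.getD p.1 0) else r)
    PySem.Dict.empty
  b.items.foldl
    (fun r p => if a.contains p.1 = false ∧ p.2 > 0 then r.insert p.1 p.2 else r) r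

-- the body of A's 'for count in total_count.values()' loop; state = (length, odd_found)
def pvStep (st : Int × Bool) (c : Int) : Int × Bool :=
  if PySem.Int.mod c 2 == 0 then (st.1 + c, st.2) else (st.1 + c - 1, true)

def maxPalindromeLength (s1 : String) (s2 : String) : Int :=
  let count1 := PySem.Dict.counter s1.toList
  let count2 := PySem.Dict.counter s2.toList
  let totalCount := pvCounterAdd count1 count2
  let st := totalCount.values.foldl pvStep (0, false)
  if st.2 then st.1 + 1 else st.1

-- ===== PORT B =====
-- 'if ch in odd: odd.discard(ch) else: odd.add(ch)'
def pvToggle (s : PySem.Set Char) (ch : Char) : PySem.Set Char :=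
  if PySem.Set.contains s ch then PySem.Set.discard s ch else PySem.Set.add s ch

def maxPalindromeLength_alt (s1 : String) (s2 : String) : Int :=
  let odd1 := s1.toList.foldl pvToggle PySem.Set.empty
  let odd2 := s2.toList.foldl pvToggle odd1
  let k : Int := PySem.Set.len odd2
  PySem.Str.len s1 + PySem.Str.len s2 - k + (if k ≠ 0 then 1 else 0)

-- ===== PRECONDITION & SPEC =====
def Spec_maxPalindromeLength (s1 : String) (s2 : String) (out : Int) : Prop := out = maxPalindromeLength_alt s1 s2
instance (s1 : String) (s2 : String) (out : Int) : Decidable (Spec_maxPalindromeLength s1 s2 out) := by unfold Spec_maxPalindromeLength; infer_instance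

-- ===== CLAIM (what is proved, stated in full; the proofs are below) =====
def Claim_equal_maxPalindromeLength : Prop := ∀ (s1 : String) (s2 : String), Dom_maxPalindromeLength s1 s2 → Spec_maxPalindromeLength s1 s2 (maxPalindromeLength s1 s2)

-- ===== LEMMAS AND PROOFS =====

-- fold 1 of pvCounterAdd: every key of count1 is inserted with the combined count
theorem pv_fold1_items (l1 l2 : List Char) :
    ((PySem.Dict.counter l1).items.foldl
      (fun r p => if p.2 + (PySem.Dict.counter l2).getD p.1 0 > 0
                  then r.insert p.1 (p.2 + (PySem.Dict.counter l2).getD p.1 0) else r)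
      PySem.Dict.empty).items
    = (PySem.Set.ofList l1).map (fun k => (k, ((l1.count k : Int) + (l2.count k : Int)))) := by
  rw [PySem.Dict.items_counter l1]
  rw [PySem.List.foldl_congr_mem'
      ((PySem.Set.ofList l1).map (fun k => (k, (l1.count k : Int))))
      (fun r p => if p.2 + (PySem.Dict.counter l2).getD p.1 0 > 0
                  then r.insert p.1 (p.2 + (PySem.Dict.counter l2).getD p.1 0) else r)
      (fun r p => r.insert p.1 (p.2 + ((l2.count p.1 : Nat) : Int)))
      PySem.Dict.empty
      (by
        rintro p hp r
        obtain ⟨k, hk, rfl⟩ := List.mem_map.1 hp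
        have hk1 : k ∈ l1 := (PySem.Set.mem_ofList _ _).1 hk
        have hc : 1 ≤ l1.count k := List.one_le_count_iff.2 hk1
        simp only [PySem.Dict.getD_counter]
        rw [if_pos]
        have : (0:Int) ≤ l2.count k := by positivity
        have : (1:Int) ≤ l1.count k := by exact_mod_cast hc
        simp only [gt_iff_lt]; omega)]
  rw [PySem.Dict.items_foldl_insert_fresh _ Prod.fst
      (fun p => p.2 + ((l2.count p.1 : Nat) : Int)) PySem.Dict.empty
      (by intro p _; simp)
      (by
        have : (List.map Prod.fst ((PySem.Set.ofList l1).map (fun k => (k, (l1.count k : Int)))))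
            = PySem.Set.ofList l1 := by simp [List.map_map, Function.comp_def]
        rw [this]; exact PySem.Set.nodup_ofList _)]
  simp [List.map_map, Function.comp_def, PySem.Dict.empty]

-- fold 2 of pvCounterAdd: keys of count2 not already present are appended
theorem pv_fold2_items (l1 l2 : List Char) (d : PySem.Dict Char Int)
    (hd : d.items = (PySem.Set.ofList l1).map (fun k => (k, ((l1.count k : Int) + (l2.count k : Int))))) :
    ((PySem.Dict.counter l2).items.foldl
      (fun r p => if (PySem.Dict.counter l1).contains p.1 = false ∧ p.2 > 0
                  then r.insert p.1 p.2 else r) d).items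
    = d.items ++ ((PySem.Set.ofList l2).filter (fun k => !(l1.contains k))).map
        (fun k => (k, (l2.count k : Int))) := by
  rw [PySem.Dict.items_counter l2]
  rw [PySem.List.foldl_ite_eq_foldl_filter]
  rw [List.filter_map]
  rw [List.filter_congr (q := fun k => !(l1.contains k))
      (by
        intro k hk
        have hk2 : k ∈ l2 := (PySem.Set.mem_ofList _ _).1 hk
        have hc : 1 ≤ l2.count k := List.one_le_count_iff.2 hk2
        simp only [Function.comp, PySem.Dict.contains_counter]
        have : ((l2.count k : Nat) : Int) > 0 := by exact_mod_cast hc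
        by_cases h : l1.contains k <;> simp [h, this] <;> exact fun _ => hk2)]
  rw [PySem.Dict.items_foldl_insert_fresh _ Prod.fst Prod.snd d
      (by
        rintro p hp
        obtain ⟨k, hk, rfl⟩ := List.mem_map.1 hp
        have hnk : k ∉ l1 := by
          have := (List.mem_filter.1 hk).2
          simpa [List.contains_iff_mem] using this
        rcases h : d.contains k with _ | _
        · rfl
        · exfalso
          have hm := (PySem.Dict.contains_iff_mem_keys d k).1 h
          rw [PySem.Dict.keys, hd] at hm
          simp [List.map_map, Function.comp_def] at hm
          exact hnk hm)
      (by
        rw [List.map_map]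
        have : (Prod.fst ∘ (fun k => ((k : Char), (l2.count k : Int)))) = id := by
          funext k; rfl
        rw [this, List.map_id]
        exact (PySem.Set.nodup_ofList l2).filter _)]
  simp

-- A's combined counter holds exactly the distinct characters of l1 ++ l2 with their total counts
theorem pvCounterAdd_values (l1 l2 : List Char) :
    (pvCounterAdd (PySem.Dict.counter l1) (PySem.Dict.counter l2)).values
      = (PySem.Set.ofList (l1 ++ l2)).map (fun k => (((l1 ++ l2).count k : Nat) : Int)) := by
  unfold pvCounterAdd
  rw [PySem.Dict.values, pv_fold2_items l1 l2 _ (pv_fold1_items l1 l2)]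
  rw [pv_fold1_items l1 l2]
  rw [PySem.Set.ofList_append, PySem.Set.update_eq_append_filter]
  conv_rhs => rw [List.filter_congr (q := fun k => !(l1.contains k))
      (by
        intro y _
        by_cases h : y ∈ l1 <;>
          simp [PySem.Set.contains_eq_listContains, List.contains_iff_mem,
            (PySem.Set.mem_ofList l1 y), h])]
  rw [List.map_append, List.map_append, List.map_map, List.map_map]
  congr 1
  · apply List.map_congr_left; intro k hk
    simp [Function.comp, List.count_append]
  · apply List.map_congr_left; intro k hk
    have hnk : k ∉ l1 := by simpa [List.contains_iff_mem] using (List.mem_filter.1 hk).2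
    simp [Function.comp, List.count_append, List.count_eq_zero_of_not_mem hnk]

-- closed form of A's loop
theorem pvStep_foldl (v : List Int) (a : Int) (b : Bool) :
    v.foldl pvStep (a, b)
      = (a + (v.map (fun c => c - PySem.Int.mod c 2)).sum,
         b || v.any (fun c => !(PySem.Int.mod c 2 == 0))) := by
  induction v generalizing a b with
  | nil => simp
  | cons c v ih =>
    rw [List.foldl_cons, List.map_cons, List.sum_cons, List.any_cons]
    rcases PySem.Int.mod_two_eq c with h | h
    · have hs : pvStep (a, b) c = (a + c, b) := by simp only [pvStep, h]; norm_num
      rw [hs, ih, h]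
      simp [h]
      ring
    · have hs : pvStep (a, b) c = (a + c - 1, true) := by simp only [pvStep, h]; norm_num
      rw [hs, ih, h]
      simp [h]
      ring

theorem sum_map_sub_int {α : Type} (l : List α) (f g : α → Int) :
    (l.map (fun k => f k - g k)).sum = (l.map f).sum - (l.map g).sum := by
  induction l with
  | nil => simp
  | cons x xs ih => simp [ih]; ring

-- the counts of the distinct elements sum to the length
theorem sum_map_count_ofList (l : List Char) :
    ((PySem.Set.ofList l).map (fun k => ((l.count k : Nat) : Int))).sum = (l.length : Int) := by
  have hn : (PySem.Set.ofList l : List Char).Nodup := PySem.Set.nodup_ofList l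
  have hts : (PySem.Set.ofList l : List Char).toFinset = l.toFinset := by
    ext x; simp [List.mem_toFinset, (PySem.Set.mem_ofList l x)]
  rw [← List.sum_toFinset _ hn, hts]
  rw [← Nat.cast_sum]
  exact_mod_cast congrArg (Nat.cast : Nat → Int) (List.sum_toFinset_count_eq_length l)

-- B's parity fold keeps the set duplicate-free
theorem pvToggle_nodup (l : List Char) (s : PySem.Set Char) (hs : s.Nodup) :
    (l.foldl pvToggle s).Nodup := by
  induction l generalizing s with
  | nil => exact hs
  | cons c l ih =>
    rw [List.foldl_cons]
    apply ih
    unfold pvToggle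
    split
    · exact PySem.Set.nodup_discard s c hs
    · exact PySem.Set.nodup_add s c hs

-- membership in B's parity fold: x is in the result iff its membership in the start set
-- XOR the parity of its count in the scanned list is odd
theorem pvToggle_mem (l : List Char) (s : PySem.Set Char) (x : Char) :
    x ∈ l.foldl pvToggle s ↔ Xor' (x ∈ s) (Odd (l.count x)) := by
  induction l generalizing s with
  | nil => simp [Xor']
  | cons c l ih =>
    rw [List.foldl_cons, ih]
    have hmem : x ∈ pvToggle s c ↔ (if c = x then x ∉ s else x ∈ s) := by
      unfold pvToggle
      by_cases hc : c ∈ s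
      · rw [if_pos (by simpa [PySem.Set.contains_iff] using hc), PySem.Set.mem_discard]
        by_cases hx : c = x
        · subst hx; simp [hc]
        · rw [if_neg hx]
          exact ⟨fun h => h.1, fun h => ⟨h, fun he => hx he.symm⟩⟩
      · rw [if_neg (by simp [PySem.Set.contains_iff, hc]), PySem.Set.mem_add]
        by_cases hx : c = x
        · subst hx; simp [hc]
        · rw [if_neg hx]
          exact ⟨fun h => h.elim id (fun he => absurd he.symm hx), Or.inl⟩
    rw [hmem]
    by_cases hx : c = x
    · subst hx
      rw [List.count_cons_self]
      have : Odd (l.count c + 1) ↔ ¬ Odd (l.count c) := by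
        simp [Nat.odd_add_one]
      rw [if_pos rfl, this]
      unfold Xor'; tauto
    · rw [List.count_cons_of_ne (a := x) (b := c) hx, if_neg hx]

-- ===== VERDICT (by name: the statement is the Claim_ definition above) =====
theorem maxPalindromeLength_spec : Claim_equal_maxPalindromeLength := by
  intro s1 s2 _
  unfold Spec_maxPalindromeLength
  unfold maxPalindromeLength maxPalindromeLength_alt
  simp only [pvCounterAdd_values, pvStep_foldl]
  set cs := s1.toList ++ s2.toList with hcs
  set K := (PySem.Set.ofList cs : List Char) with hK
  set p : Char → Bool := fun k => !(PySem.Int.mod ((cs.count k : Nat) : Int) 2 == 0) with hp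
  -- B's final set
  set S := s2.toList.foldl pvToggle (s1.toList.foldl pvToggle PySem.Set.empty) with hS
  have hSfold : S = cs.foldl pvToggle PySem.Set.empty := by
    rw [hS, hcs, List.foldl_append]
  -- p equals the odd-count predicate
  have hmodk : ∀ n : Nat, PySem.Int.mod ((n : Nat) : Int) 2 = ((n % 2 : Nat) : Int) := by
    intro n
    rw [PySem.Int.mod_eq_emod_of_pos (by norm_num : (0:Int) < 2)]
    omega
  have hpodd : ∀ k, p k = true ↔ Odd (cs.count k) := by
    intro k
    simp only [hp, hmodk]
    rcases Nat.even_or_odd (cs.count k) with h | h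
    · rw [Nat.even_iff.1 h]
      simp [Nat.not_odd_iff_even.2 h]
    · rw [Nat.odd_iff.1 h]
      simp [h]
  -- S has the same members as K.filter p, both Nodup, hence same length
  have hSmem : ∀ x, x ∈ S ↔ Odd (cs.count x) := by
    intro x
    rw [hSfold, pvToggle_mem]
    unfold Xor'
    simp [PySem.Set.empty]
  have hSnodup : S.Nodup := by
    rw [hSfold]; exact pvToggle_nodup cs PySem.Set.empty (by simp [PySem.Set.empty])
  have hlenS : S.length = K.countP p := by
    rw [List.countP_eq_length_filter]
    have hperm : S.Perm (K.filter p) := by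
      rw [List.perm_ext_iff_of_nodup hSnodup ((PySem.Set.nodup_ofList cs).filter p)]
      intro x
      rw [hSmem, List.mem_filter, hpodd]
      constructor
      · intro h
        refine ⟨(PySem.Set.mem_ofList cs x).2 ?_, h⟩
        exact List.count_pos_iff.1 (Nat.pos_of_ne_zero (by
          intro h0; rw [h0] at h; exact (Nat.not_odd_iff_even.2 (by simp)) h))
      · exact fun h => h.2
    exact hperm.length_eq
  -- A's sum of adjusted counts
  simp only [List.any_map, Bool.false_or, zero_add]
  have hsub : ((List.map (fun c => c - PySem.Int.mod c 2) (K.map (fun k => ((cs.count k : Nat) : Int)))).sum)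
      = (K.map (fun k => ((cs.count k : Nat) : Int))).sum
        - (K.map (fun k => PySem.Int.mod ((cs.count k : Nat) : Int) 2)).sum := by
    rw [List.map_map, ← sum_map_sub_int]; rfl
  have hcnt : (K.map (fun k => PySem.Int.mod ((cs.count k : Nat) : Int) 2)).sum
      = ((K.countP p : Nat) : Int) := by
    rw [← PySem.List.sum_map_ite_one_zero p K]
    apply congrArg; apply List.map_congr_left
    intro k _
    rcases PySem.Int.mod_two_eq ((cs.count k : Nat) : Int) with h | h <;>
      simp only [hp, h] <;> norm_num
  have hanyp : (K.any ((fun c => !(PySem.Int.mod c 2 == 0)) ∘ fun k => ((cs.count k : Nat) : Int))) = K.any p := rfl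
  have hlen := sum_map_count_ofList cs
  rw [hsub, hlen, hcnt, hanyp]
  -- B's value rewritten through cs
  have hlenB : PySem.Str.len s1 + PySem.Str.len s2 = (cs.length : Int) := by
    simp [PySem.Str.len_eq, hcs]
  have hk : (PySem.Set.len S : Int) = ((K.countP p : Nat) : Int) := by
    simp [PySem.Set.len, hlenS]
  rw [hlenB, hk]
  by_cases hA : K.any p = true
  · have hpos : 0 < K.countP p := List.countP_pos_iff.2 (List.any_eq_true.1 hA)
    have hne : ((K.countP p : Nat) : Int) ≠ 0 := by exact_mod_cast hpos.ne'
    rw [hA, if_pos hne]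
    norm_num
  · have h0 : K.countP p = 0 := by
      by_contra h
      exact hA (List.any_eq_true.2 (List.countP_pos_iff.1 (Nat.pos_of_ne_zero h)))
    rw [Bool.not_eq_true] at hA
    rw [hA, h0]
    norm_num
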